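-- pv_equiv track=rewrite | github.com/HanYoonSoo/PS | 백준/Gold/2225. 합분해/합분해.py | count_sum_combinations
-- ===== SOURCE A (Python) =====
-- def count_sum_combinations(N, K):
--     dp = [[0] * (N + 1) for _ in range(K + 1)]  # 동적 계획법을 위한 2차원 배열 생성
--
--     for i in range(K + 1):
--         dp[i][0] = 1  # 합이 0인 경우는 1가지 방법으로 가능
--
--     for i in range(1, K + 1):
--         for j in range(1, N + 1):
--             dp[i][j] = (dp[i][j - 1] + dp[i - 1][j]) % 1000000000  # 1,000,000,000으로 나눈 나머지 계산
--
--     return dp[K][N]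
-- ===== SOURCE B (Python) =====
-- def count_sum_combinations(N, K):
--     # Number of ordered K-tuples of non-negatives summing to N is C(N+K-1, N);
--     # compute it exactly by a short product, then reduce mod 1e9.
--     if K == 0:
--         return 1 if N == 0 else 0
--     n = N + K - 1
--     r = min(N, K - 1)
--     c = 1
--     for i in range(1, r + 1):
--         c = c * (n - r + i) // i
--     return c % 1000000000
-- ===== Notes on version B (the rewrite author's own statement) =====
-- stated objective: faster
-- what changed: Replaces the O(N*K) Pascal-triangle DP table by the closed-form binomial C(N+K-1, N), computed exactly with an O(min(N,K)) big-int product and reduced mod 1e9 once at the end.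
import Mathlib
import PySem

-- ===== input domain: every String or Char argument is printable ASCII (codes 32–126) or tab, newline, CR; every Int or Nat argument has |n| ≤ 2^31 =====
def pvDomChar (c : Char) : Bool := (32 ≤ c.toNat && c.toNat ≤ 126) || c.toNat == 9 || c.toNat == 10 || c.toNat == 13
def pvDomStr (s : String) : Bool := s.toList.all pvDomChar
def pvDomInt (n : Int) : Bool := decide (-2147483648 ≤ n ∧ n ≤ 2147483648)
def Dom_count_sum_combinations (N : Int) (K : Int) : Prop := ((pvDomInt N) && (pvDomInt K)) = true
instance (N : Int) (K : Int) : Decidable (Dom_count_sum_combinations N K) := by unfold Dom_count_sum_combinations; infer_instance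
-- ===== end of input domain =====

-- B replaces A's O(N*K) DP table by the closed-form binomial C(N+K-1, N), computed
-- exactly by an O(min(N,K)) product and reduced mod 1e9 at the end (objective: faster).

-- ===== PORT A =====
def count_sum_combinations (N : Int) (K : Int) : Int :=
  let dp0 : List (List Int) :=
    (PySem.List.pyRange 0 (K + 1) 1).map (fun _ => List.replicate (N + 1).toNat (0 : Int))
  let dp1 : List (List Int) :=
    (PySem.List.pyRange 0 (K + 1) 1).foldl
      (fun dp i => PySem.List.pySetD dp i
        (PySem.List.pySetD (PySem.List.pyGetD dp i []) 0 (1 : Int))) dp0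
  let dp2 : List (List Int) :=
    (PySem.List.pyRange 1 (K + 1) 1).foldl (fun dp i =>
      (PySem.List.pyRange 1 (N + 1) 1).foldl (fun dp j =>
        PySem.List.pySetD dp i
          (PySem.List.pySetD (PySem.List.pyGetD dp i []) j
            (PySem.Int.mod
              (PySem.List.pyGetD (PySem.List.pyGetD dp i []) (j - 1) 0 +
               PySem.List.pyGetD (PySem.List.pyGetD dp (i - 1) []) j 0) 1000000000))) dp) dp1
  PySem.List.pyGetD (PySem.List.pyGetD dp2 K []) N 0

-- ===== PORT B =====
def count_sum_combinations_alt (N : Int) (K : Int) : Int :=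
  if K = 0 then (if N = 0 then 1 else 0)
  else
    let n := N + K - 1
    let r := min N (K - 1)
    let c := (PySem.List.pyRange 1 (r + 1) 1).foldl
      (fun c i => PySem.Int.floordiv (c * (n - r + i)) i) 1
    PySem.Int.mod c 1000000000

-- ===== PRECONDITION & SPEC =====
-- Pre_ excludes exactly the inputs where Python A raises IndexError: any negative N or K.
def Pre_count_sum_combinations (N : Int) (K : Int) : Prop := 0 ≤ N ∧ 0 ≤ K
instance (N : Int) (K : Int) : Decidable (Pre_count_sum_combinations N K) := by
  unfold Pre_count_sum_combinations; infer_instance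
def pvWitness_count_sum_combinations : Int × Int := (3, 2)

def Spec_count_sum_combinations (N : Int) (K : Int) (out : Int) : Prop :=
  out = count_sum_combinations_alt N K
instance (N : Int) (K : Int) (out : Int) : Decidable (Spec_count_sum_combinations N K out) := by
  unfold Spec_count_sum_combinations; infer_instance

-- ===== CLAIM (what is proved, stated in full; the proofs are below) =====
def Claim_equal_count_sum_combinations : Prop :=
  ∀ (N : Int) (K : Int), Dom_count_sum_combinations N K →
    Pre_count_sum_combinations N K →
    Spec_count_sum_combinations N K (count_sum_combinations N K)

-- ===== LEMMAS AND PROOFS =====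

def pvG (i j : Nat) : Int := ((Nat.choose (i + j - 1) j : Nat) : Int) % 1000000000

def pvRowStep (dp : List (List Int)) (a b : Nat) : List (List Int) :=
  dp.set (a+1) ((dp.getD (a+1) []).set (b+1)
    (((dp.getD (a+1) []).getD b 0 + (dp.getD a []).getD (b+1) 0) % 1000000000))

def pvNatA (nn k : Nat) : Int :=
  let dp1 := (List.range (k+1)).foldl
      (fun dp t => dp.set t ((dp.getD t []).set 0 1))
      (List.replicate (k+1) (List.replicate (nn+1) (0:Int)))
  let dp2 := (List.range k).foldl (fun dp a =>
      (List.range nn).foldl (fun dp b => pvRowStep dp a b) dp) dp1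
  (dp2.getD k []).getD nn 0

-- getD/set toolbox

theorem pv_getD_set_self (l : List Int) (i : Nat) (a : Int) (h : i < l.length) (d : Int) :
    (l.set i a).getD i d = a := by
  simp [List.getD_eq_getElem?_getD, h]

theorem pv_getD_set_ne (l : List Int) (i j : Nat) (a : Int) (h : j ≠ i) (d : Int) :
    (l.set i a).getD j d = l.getD j d := by
  simp [List.getD_eq_getElem?_getD, (Ne.symm h)]

theorem pv_getD_set_self' (l : List (List Int)) (i : Nat) (a : List Int) (h : i < l.length) :
    (l.set i a).getD i [] = a := by
  simp [List.getD_eq_getElem?_getD, h]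

theorem pv_getD_set_ne' (l : List (List Int)) (i j : Nat) (a : List Int) (h : j ≠ i) :
    (l.set i a).getD j [] = l.getD j [] := by
  simp [List.getD_eq_getElem?_getD, (Ne.symm h)]

theorem pv_set_getD_self (l : List (List Int)) (i : Nat) (h : i < l.length) :
    l.set i (l.getD i []) = l := by
  rw [List.getD_eq_getElem l [] h]
  exact List.set_getElem_self h

-- the "final" rows of the DP

def pvRow0 (nn : Nat) : List Int := (List.replicate (nn+1) (0:Int)).set 0 1

def pvF (nn : Nat) : Nat → List Int
  | 0 => pvRow0 nn
  | (i+1) => (List.range nn).foldl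
      (fun r b => r.set (b+1) ((r.getD b 0 + ((pvF nn i).getD (b+1) 0)) % 1000000000))
      (pvRow0 nn)

-- init fold: setting row t := f (row t) for t over all indices is map

theorem pv_init_fold (f : List Int → List Int) :
    ∀ (dp pre : List (List Int)),
      (List.range' pre.length dp.length).foldl (fun g t => g.set t (f (g.getD t []))) (pre ++ dp)
        = pre ++ dp.map f := by
  intro dp
  induction dp with
  | nil => intro pre; simp
  | cons x l ih =>
    intro pre
    simp only [List.length_cons, List.range'_succ, List.foldl_cons]
    have h1 : (pre ++ x :: l).getD pre.length [] = x := by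
      simp [List.getD_eq_getElem?_getD]
    have h2 : (pre ++ x :: l).set pre.length (f x) = (pre ++ [f x]) ++ l := by simp
    rw [h1, h2]
    have h3 : pre.length + 1 = (pre ++ [f x]).length := by simp
    rw [h3, ih (pre ++ [f x])]
    simp

theorem pv_dp1_eq (nn k : Nat) :
    (List.range (k+1)).foldl (fun dp t => dp.set t ((dp.getD t []).set 0 1))
      (List.replicate (k+1) (List.replicate (nn+1) (0:Int)))
      = List.replicate (k+1) (pvRow0 nn) := by
  have := pv_init_fold (fun r => r.set 0 1) (List.replicate (k+1) (List.replicate (nn+1) (0:Int))) []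
  simpa [List.range_eq_range', pvRow0] using this

-- inner fold: only row a+1 changes

theorem pv_inner_fold (a : Nat) (dp : List (List Int)) (ha : a + 1 < dp.length) :
    ∀ (bs : List Nat) (r : List Int),
      bs.foldl (fun g b => pvRowStep g a b) (dp.set (a+1) r)
        = dp.set (a+1) (bs.foldl
            (fun r b => r.set (b+1) ((r.getD b 0 + ((dp.getD a []).getD (b+1) 0)) % 1000000000)) r) := by
  intro bs
  induction bs with
  | nil => intro r; rfl
  | cons b bs ih =>
    intro r
    simp only [List.foldl_cons]
    rw [show pvRowStep (dp.set (a+1) r) a b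
        = dp.set (a+1) (r.set (b+1) ((r.getD b 0 + ((dp.getD a []).getD (b+1) 0)) % 1000000000)) from ?_]
    · exact ih _
    · unfold pvRowStep
      rw [pv_getD_set_self' dp (a+1) r ha, pv_getD_set_ne' _ _ _ _ (by omega), List.set_set]

-- row values

theorem pv_row0_getD (nn j : Nat) (hj : j ≤ nn) :
    (pvRow0 nn).getD j 0 = pvG 0 j := by
  unfold pvRow0 pvG
  rcases Nat.eq_zero_or_pos j with h | h
  · subst h
    rw [pv_getD_set_self _ _ _ (by simp) 0]
    norm_num
  · rw [pv_getD_set_ne _ _ _ _ (by omega) 0, List.getD_replicate _ (by omega),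
      Nat.choose_eq_zero_of_lt (by omega)]
    norm_num

theorem pv_length_row0 (nn : Nat) : (pvRow0 nn).length = nn + 1 := by simp [pvRow0]

theorem pv_pascal (i s : Nat) :
    (pvG (i+1) s + pvG i (s+1)) % 1000000000 = pvG (i+1) (s+1) := by
  unfold pvG
  rw [Int.add_emod_emod, Int.emod_add_emod]
  have h1 : i + 1 + s - 1 = i + s := by omega
  have h2 : i + (s + 1) - 1 = i + s := by omega
  have h3 : i + 1 + (s + 1) - 1 = (i + s) + 1 := by omega
  rw [h1, h2, h3, Nat.choose_succ_succ]
  push_cast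
  ring

theorem pv_F_getD (nn : Nat) : ∀ (i : Nat),
    (pvF nn i).length = nn + 1 ∧ ∀ j ≤ nn, (pvF nn i).getD j 0 = pvG i j := by
  intro i
  induction i with
  | zero => exact ⟨pv_length_row0 nn, fun j hj => pv_row0_getD nn j hj⟩
  | succ i ih =>
    -- inner induction on the prefix length of range nn
    have main : ∀ s ≤ nn,
        ((List.range s).foldl
          (fun r b => r.set (b+1) ((r.getD b 0 + ((pvF nn i).getD (b+1) 0)) % 1000000000))
          (pvRow0 nn)).length = nn + 1
        ∧ ∀ j ≤ nn, ((List.range s).foldl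
          (fun r b => r.set (b+1) ((r.getD b 0 + ((pvF nn i).getD (b+1) 0)) % 1000000000))
          (pvRow0 nn)).getD j 0 = if j ≤ s then pvG (i+1) j else 0 := by
      intro s
      induction s with
      | zero =>
        intro _
        refine ⟨pv_length_row0 nn, fun j hj => ?_⟩
        simp only [List.range_zero, List.foldl_nil]
        rcases Nat.eq_zero_or_pos j with h | h
        · subst h
          simp only [Nat.le_refl, if_true]
          rw [pv_row0_getD nn 0 (by omega)]
          unfold pvG; norm_num
        · rw [if_neg (by omega)]
          unfold pvRow0
          rw [pv_getD_set_ne _ _ _ _ (by omega) 0, List.getD_replicate _ (by omega)]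
      | succ s ihs =>
        intro hs
        obtain ⟨hlen, hval⟩ := ihs (by omega)
        rw [List.range_succ, List.foldl_append, List.foldl_cons, List.foldl_nil]
        constructor
        · rw [List.length_set]; exact hlen
        · intro j hj
          rcases eq_or_ne j (s+1) with h | h
          · subst h
            rw [pv_getD_set_self _ _ _ (by omega) 0]
            rw [hval s (by omega), if_pos (le_refl s), (ih.2 (s+1) (by omega))]
            rw [if_pos (le_refl (s+1)), pv_pascal]
          · rw [pv_getD_set_ne _ _ _ _ h 0, hval j hj]
            rcases Nat.lt_or_ge j (s+1) with hlt | hge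
            · rw [if_pos (by omega), if_pos (by omega)]
            · rw [if_neg (by omega), if_neg (by omega)]
    obtain ⟨hlen, hval⟩ := main nn (le_refl nn)
    refine ⟨by simpa [pvF] using hlen, fun j hj => ?_⟩
    have := hval j hj
    rw [if_pos hj] at this
    simpa [pvF] using this

-- outer fold invariant

theorem pv_outer_fold (nn k : Nat) : ∀ t ≤ k,
    ((List.range t).foldl (fun dp a =>
        (List.range nn).foldl (fun dp b => pvRowStep dp a b) dp)
      (List.replicate (k+1) (pvRow0 nn))).length = k + 1
    ∧ ∀ i ≤ k, ((List.range t).foldl (fun dp a =>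
        (List.range nn).foldl (fun dp b => pvRowStep dp a b) dp)
      (List.replicate (k+1) (pvRow0 nn))).getD i []
        = if i ≤ t then pvF nn i else pvRow0 nn := by
  intro t
  induction t with
  | zero =>
    intro _
    refine ⟨by simp, fun i hi => ?_⟩
    simp only [List.range_zero, List.foldl_nil]
    rw [List.getD_replicate _ (show i < k+1 by omega)]
    rcases Nat.eq_zero_or_pos i with h | h
    · subst h; simp [pvF]
    · rw [if_neg (by omega)]
  | succ t iht =>
    intro ht
    obtain ⟨hlen, hval⟩ := iht (by omega)
    rw [List.range_succ, List.foldl_append, List.foldl_cons, List.foldl_nil]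
    set dpT := (List.range t).foldl (fun dp a =>
        (List.range nn).foldl (fun dp b => pvRowStep dp a b) dp)
      (List.replicate (k+1) (pvRow0 nn)) with hdpT
    have hset : dpT = dpT.set (t+1) (dpT.getD (t+1) []) :=
      (pv_set_getD_self dpT (t+1) (by omega)).symm
    rw [show (List.range nn).foldl (fun dp b => pvRowStep dp t b) dpT
        = dpT.set (t+1) ((List.range nn).foldl
            (fun r b => r.set (b+1) ((r.getD b 0 + ((dpT.getD t []).getD (b+1) 0)) % 1000000000))
            (dpT.getD (t+1) [])) from ?_]
    · constructor
      · rw [List.length_set]; exact hlen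
      · intro i hi
        rcases eq_or_ne i (t+1) with h | h
        · subst h
          rw [pv_getD_set_self' _ _ _ (by omega)]
          rw [if_pos (le_refl (t+1))]
          rw [hval (t+1) (by omega), if_neg (by omega), hval t (by omega), if_pos (le_refl t)]
          rfl
        · rw [pv_getD_set_ne' _ _ _ _ h, hval i hi]
          rcases Nat.lt_or_ge i (t+1) with hlt | hge
          · rw [if_pos (by omega), if_pos (by omega)]
          · rw [if_neg (by omega), if_neg (by omega)]
    · conv_lhs => rw [hset]
      exact pv_inner_fold t dpT (by omega) (List.range nn) (dpT.getD (t+1) [])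

theorem natA_eq_g (nn k : Nat) : pvNatA nn k = pvG k nn := by
  unfold pvNatA
  simp only [pv_dp1_eq nn k]
  obtain ⟨hlen, hval⟩ := pv_outer_fold nn k k (le_refl k)
  rw [hval k (le_refl k), if_pos (le_refl k)]
  exact (pv_F_getD nn k).2 nn (le_refl nn)

theorem portA_eq_natA (N K : Int) (hN : 0 ≤ N) (hK : 0 ≤ K) :
    count_sum_combinations N K = pvNatA N.toNat K.toNat := by
  lift N to Nat using hN with nn
  lift K to Nat using hK with k
  have c1 : ∀ b : Nat, (1:Int) + (b:Int) = ((b+1 : Nat) : Int) := by intro b; push_cast; ring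
  have c2 : ∀ b : Nat, ((b+1 : Nat) : Int) - 1 = (b:Int) := by intro b; push_cast; ring
  have c3 : ∀ x : Int, PySem.Int.mod x 1000000000 = x % 1000000000 :=
    fun x => PySem.Int.mod_eq_emod_of_pos (by norm_num)
  have c4 : ((k:Int) + 1 - 0).toNat = k + 1 := by omega
  have c5 : ((nn:Int) + 1 - 1).toNat = nn := by omega
  have c6 : ((k:Int) + 1 - 1).toNat = k := by omega
  have c7 : ((nn:Int) + 1).toNat = nn + 1 := by omega
  have c8 : ∀ (r : List Int), PySem.List.pySetD r 0 1 = r.set 0 1 := by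
    intro r
    have h := PySem.List.pySetD_natCast (xs := r) (n := 0) (v := (1:Int))
    simpa using h
  simp only [count_sum_combinations, pvNatA, pvRowStep,
    PySem.List.pyRange_one, c4, c5, c6, c7, List.foldl_map, List.map_map,
    zero_add, c1, c2, c3,
    PySem.List.pySetD_natCast, PySem.List.pyGetD_natCast, Int.toNat_natCast, c8, Function.comp_def, List.map_const', List.length_range]

theorem pvProd (d : Nat) : ∀ (m : Nat),
    (PySem.List.pyRange 1 ((m:Int)+1) 1).foldl
      (fun c i => PySem.Int.floordiv (c * ((d:Int) + i)) i) 1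
      = ((Nat.choose (d + m) m : Nat) : Int) := by
  intro m
  induction m with
  | zero => simp [PySem.List.pyRange_one_eq_nil]
  | succ m ih =>
    have h1 : ((m+1 : Nat) : Int) + 1 = ((m:Int)+1) + 1 := by push_cast; ring
    rw [h1, PySem.List.pyRange_one_succ_right (by omega), List.foldl_append, ih]
    simp only [List.foldl_cons, List.foldl_nil]
    have hpos : (0:Int) < (m:Int) + 1 := by omega
    rw [PySem.Int.floordiv_eq_ediv_of_pos hpos]
    have hnum : ((Nat.choose (d + m) m : Nat) : Int) * ((d:Int) + ((m:Int)+1))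
        = ((Nat.choose (d + m + 1) (m + 1) : Nat) : Int) * ((m:Int)+1) := by
      have := Nat.add_one_mul_choose_eq (d + m) m
      push_cast at this
      nlinarith [this]
    rw [hnum, Int.mul_ediv_cancel _ (by omega)]
    congr 1

theorem portB_eq_g (N K : Int) (hN : 0 ≤ N) (hK : 0 ≤ K) :
    count_sum_combinations_alt N K = pvG K.toNat N.toNat := by
  unfold count_sum_combinations_alt pvG
  by_cases hK0 : K = 0
  · subst hK0
    rw [if_pos rfl]
    by_cases hN0 : N = 0
    · subst hN0; norm_num
    · rw [if_neg hN0]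
      have hz : (N.toNat - 1).choose N.toNat = 0 :=
        Nat.choose_eq_zero_of_lt (by omega)
      simp only [Int.toNat_zero, Nat.zero_add, hz, Nat.cast_zero]
      norm_num
  · rw [if_neg hK0]
    have hK1 : 1 ≤ K := by omega
    set m : Nat := (min N (K-1)).toNat with hm
    set d : Nat := (N + K - 1 - min N (K-1)).toNat with hd
    have hmc : min N (K-1) = (m:Int) := by rw [hm]; omega
    have hdc : N + K - 1 - min N (K-1) = (d:Int) := by rw [hd]; omega
    have key : (PySem.List.pyRange 1 (min N (K-1) + 1) 1).foldl
        (fun c i => PySem.Int.floordiv (c * (N + K - 1 - min N (K-1) + i)) i) 1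
        = ((Nat.choose (d + m) m : Nat) : Int) := by
      rw [hdc, hmc]; exact pvProd d m
    simp only [] at key ⊢
    rw [key]
    have hchoose : Nat.choose (d + m) m = Nat.choose (K.toNat + N.toNat - 1) N.toNat := by
      have hdm : d + m = K.toNat + N.toNat - 1 := by omega
      have hNle : N.toNat ≤ d + m := by omega
      have hm' : m = (d + m) - N.toNat ∨ m = N.toNat := by omega
      rcases hm' with h | h
      · calc (d+m).choose m = (d+m).choose ((d+m) - N.toNat) := by rw [← h]
          _ = (d+m).choose N.toNat := Nat.choose_symm hNle
          _ = (K.toNat + N.toNat - 1).choose N.toNat := by rw [hdm]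
      · rw [h] at hdm ⊢; rw [hdm]
    rw [hchoose, PySem.Int.mod_eq_emod_of_pos (by norm_num)]

-- ===== VERDICT (by name: the statement is the Claim_ definition above) =====
theorem count_sum_combinations_spec : Claim_equal_count_sum_combinations := by
  intro N K _ hpre
  unfold Spec_count_sum_combinations
  rw [portA_eq_natA N K hpre.1 hpre.2, natA_eq_g, portB_eq_g N K hpre.1 hpre.2]
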